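-- pv_equiv track=rewrite | github.com/ldgeorge85/Legba | src/legba/ui/routes/cycles.py | _detect_cycle_type
-- ===== SOURCE A (Python) =====
-- _CYCLE_TYPE_KEYWORDS = {
--     "evolve": "EVOLVE",
--     "introspection": "INTROSPECTION",
--     "analysis": "ANALYSIS",
--     "analyze": "ANALYSIS",
--     "research": "RESEARCH",
--     "acquire": "ACQUIRE",
-- }
--
-- def _detect_cycle_type(phase_names: list[str]) -> str:
--     """Detect cycle type from phase event names.
--
--     Looks for keywords like 'acquire', 'research', 'analysis', 'introspection'
--     in the phase names. Returns the highest-priority match or 'NORMAL'.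
--     """
--     priority = ["EVOLVE", "INTROSPECTION", "ANALYSIS", "RESEARCH", "ACQUIRE"]
--     detected = set()
--     for name in phase_names:
--         lower = name.lower()
--         for keyword, ctype in _CYCLE_TYPE_KEYWORDS.items():
--             if keyword in lower:
--                 detected.add(ctype)
--     for p in priority:
--         if p in detected:
--             return p
--     return "NORMAL"
-- ===== SOURCE B (Python) =====
-- _PRIORITY_KEYWORDS = [
--     ("EVOLVE", ["evolve"]),
--     ("INTROSPECTION", ["introspection"]),
--     ("ANALYSIS", ["analysis", "analyze"]),
--     ("RESEARCH", ["research"]),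
--     ("ACQUIRE", ["acquire"]),
-- ]
--
-- def _detect_cycle_type(phase_names: list) -> str:
--     lowered = [name.lower() for name in phase_names]
--     for ctype, keywords in _PRIORITY_KEYWORDS:
--         if any(k in low for low in lowered for k in keywords):
--             return ctype
--     return "NORMAL"
-- ===== Notes on version B (the rewrite author's own statement) =====
-- stated objective: simpler
-- what changed: B inverts the structure: instead of collecting all detected types into a set and then ranking, it groups keywords by cycle type in priority order and returns the first priority type whose keywords occur in any lowercased phase name, short-circuiting without any intermediate set.
import Mathlib
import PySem

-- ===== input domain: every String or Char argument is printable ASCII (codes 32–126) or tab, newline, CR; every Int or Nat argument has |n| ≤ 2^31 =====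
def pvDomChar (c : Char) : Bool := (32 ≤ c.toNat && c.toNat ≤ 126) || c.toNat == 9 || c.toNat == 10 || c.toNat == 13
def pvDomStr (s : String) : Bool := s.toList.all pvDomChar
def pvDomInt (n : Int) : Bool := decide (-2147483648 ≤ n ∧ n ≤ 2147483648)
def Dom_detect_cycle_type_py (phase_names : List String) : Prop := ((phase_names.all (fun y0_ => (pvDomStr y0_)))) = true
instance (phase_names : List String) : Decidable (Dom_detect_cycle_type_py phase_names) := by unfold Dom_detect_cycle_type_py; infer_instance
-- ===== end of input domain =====

-- B replaces A's collect-all-types-into-a-set-then-rank two-pass by a priority-first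
-- short-circuiting search (keywords grouped per type); objective: simpler.

-- ===== PORT A =====
-- _CYCLE_TYPE_KEYWORDS, as dict items in insertion order
def pvKw : List (String × String) :=
  [("evolve", "EVOLVE"), ("introspection", "INTROSPECTION"), ("analysis", "ANALYSIS"),
   ("analyze", "ANALYSIS"), ("research", "RESEARCH"), ("acquire", "ACQUIRE")]

-- 'for p in priority: if p in detected: return p' / 'return "NORMAL"'
def pvRank : List String → PySem.Set String → String
  | [], _ => "NORMAL"
  | p :: ps, d => if PySem.Set.contains d p then p else pvRank ps d

def detect_cycle_type_py (phase_names : List String) : String :=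
  let detected : PySem.Set String :=
    phase_names.foldl (fun s name =>
      pvKw.foldl (fun s kt =>
        if PySem.Str.isIn kt.1 (PySem.Str.lower name) then PySem.Set.add s kt.2 else s) s)
      PySem.Set.empty
  pvRank ["EVOLVE", "INTROSPECTION", "ANALYSIS", "RESEARCH", "ACQUIRE"] detected

-- ===== PORT B =====
def pvGroups : List (String × List String) :=
  [("EVOLVE", ["evolve"]), ("INTROSPECTION", ["introspection"]),
   ("ANALYSIS", ["analysis", "analyze"]), ("RESEARCH", ["research"]), ("ACQUIRE", ["acquire"])]

-- 'for ctype, keywords in _PRIORITY_KEYWORDS: if any(...): return ctype' / 'return "NORMAL"'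
def pvPrio (lowered : List String) : List (String × List String) → String
  | [] => "NORMAL"
  | (t, kws) :: rest =>
    if lowered.any (fun low => kws.any (fun k => PySem.Str.isIn k low)) then t
    else pvPrio lowered rest

def detect_cycle_type_py_alt (phase_names : List String) : String :=
  pvPrio (phase_names.map PySem.Str.lower) pvGroups

-- ===== PRECONDITION & SPEC =====
def Spec_detect_cycle_type_py (phase_names : List String) (out : String) : Prop := out = detect_cycle_type_py_alt phase_names
instance (phase_names : List String) (out : String) : Decidable (Spec_detect_cycle_type_py phase_names out) := by unfold Spec_detect_cycle_type_py; infer_instance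

-- ===== CLAIM (what is proved, stated in full; the proofs are below) =====
def Claim_equal_detect_cycle_type_py : Prop := ∀ (phase_names : List String), Dom_detect_cycle_type_py phase_names → Spec_detect_cycle_type_py phase_names (detect_cycle_type_py phase_names)

-- ===== LEMMAS AND PROOFS =====

-- membership after the inner (keyword) fold, generic in keyword list and accumulator
theorem pv_mem_inner (c : String → Bool) (kws : List (String × String))
    (s : PySem.Set String) (y : String) :
    (y ∈ kws.foldl (fun s kt => if c kt.1 then PySem.Set.add s kt.2 else s) s) ↔
      y ∈ s ∨ ∃ kt ∈ kws, c kt.1 ∧ kt.2 = y := by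
  induction kws generalizing s with
  | nil => simp
  | cons kt rest ih =>
    simp only [List.foldl_cons, List.mem_cons]
    by_cases h : c kt.1 = true
    · simp only [h, if_true, ih, PySem.Set.mem_add]
      constructor
      · rintro ((hs | rfl) | ⟨kt', hkt', hc, he⟩)
        · exact Or.inl hs
        · exact Or.inr ⟨kt, Or.inl rfl, h, rfl⟩
        · exact Or.inr ⟨kt', Or.inr hkt', hc, he⟩
      · rintro (hs | ⟨kt', (rfl | hkt'), hc, he⟩)
        · exact Or.inl (Or.inl hs)
        · exact Or.inl (Or.inr he.symm)
        · exact Or.inr ⟨kt', hkt', hc, he⟩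
    · simp only [h, if_false, Bool.false_eq_true, ih]
      constructor
      · rintro (hs | ⟨kt', hkt', hc, he⟩)
        · exact Or.inl hs
        · exact Or.inr ⟨kt', Or.inr hkt', hc, he⟩
      · rintro (hs | ⟨kt', (rfl | hkt'), hc, he⟩)
        · exact Or.inl hs
        · exact absurd hc h
        · exact Or.inr ⟨kt', hkt', hc, he⟩

-- membership in A's 'detected' set
theorem pv_mem_detected (phase_names : List String) (s : PySem.Set String) (y : String) :
    (y ∈ phase_names.foldl (fun s name =>
        pvKw.foldl (fun s kt =>
          if PySem.Str.isIn kt.1 (PySem.Str.lower name) then PySem.Set.add s kt.2 else s) s) s) ↔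
      y ∈ s ∨ ∃ n ∈ phase_names, ∃ kt ∈ pvKw,
        PySem.Str.isIn kt.1 (PySem.Str.lower n) = true ∧ kt.2 = y := by
  induction phase_names generalizing s with
  | nil => simp
  | cons n rest ih =>
    simp only [List.foldl_cons, List.mem_cons]
    rw [ih, pv_mem_inner (fun k => PySem.Str.isIn k (PySem.Str.lower n))]
    constructor
    · rintro ((hs | hkt) | ⟨n', hn', hkt'⟩)
      · exact Or.inl hs
      · exact Or.inr ⟨n, Or.inl rfl, hkt⟩
      · exact Or.inr ⟨n', Or.inr hn', hkt'⟩
    · rintro (hs | ⟨n', (rfl | hn'), hkt'⟩)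
      · exact Or.inl (Or.inl hs)
      · exact Or.inl (Or.inr hkt')
      · exact Or.inr ⟨n', hn', hkt'⟩

-- A's membership test for a priority type t equals B's any-scan for t's keyword group
theorem pv_cond_eq (phase_names : List String) (t : String) (kws : List String)
    (hiff : ∀ n : String, (∃ kt ∈ pvKw, PySem.Str.isIn kt.1 (PySem.Str.lower n) = true ∧ kt.2 = t) ↔
            ∃ k ∈ kws, PySem.Str.isIn k (PySem.Str.lower n) = true) :
    PySem.Set.contains
      (phase_names.foldl (fun s name =>
        pvKw.foldl (fun s kt =>
          if PySem.Str.isIn kt.1 (PySem.Str.lower name) then PySem.Set.add s kt.2 else s) s)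
        PySem.Set.empty) t =
    (phase_names.map PySem.Str.lower).any (fun low => kws.any (fun k => PySem.Str.isIn k low)) := by
  rw [Bool.eq_iff_iff, PySem.Set.contains_iff, pv_mem_detected]
  simp only [PySem.Set.empty, List.not_mem_nil, false_or, List.any_eq_true, List.mem_map]
  constructor
  · rintro ⟨n, hn, hkt⟩
    exact ⟨PySem.Str.lower n, ⟨n, hn, rfl⟩, (hiff n).1 hkt⟩
  · rintro ⟨low, ⟨n, hn, rfl⟩, hk⟩
    exact ⟨n, hn, (hiff n).2 hk⟩

-- ===== VERDICT (by name: the statement is the Claim_ definition above) =====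
theorem detect_cycle_type_py_spec : Claim_equal_detect_cycle_type_py := by
  intro phase_names _
  unfold Spec_detect_cycle_type_py detect_cycle_type_py detect_cycle_type_py_alt
  simp only
  rw [show pvGroups = [("EVOLVE", ["evolve"]), ("INTROSPECTION", ["introspection"]),
      ("ANALYSIS", ["analysis", "analyze"]), ("RESEARCH", ["research"]),
      ("ACQUIRE", ["acquire"])] from rfl]
  simp only [pvRank, pvPrio]
  rw [pv_cond_eq phase_names "EVOLVE" ["evolve"] (by intro n; simp [pvKw]),
      pv_cond_eq phase_names "INTROSPECTION" ["introspection"] (by intro n; simp [pvKw]),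
      pv_cond_eq phase_names "ANALYSIS" ["analysis", "analyze"] (by intro n; simp [pvKw]),
      pv_cond_eq phase_names "RESEARCH" ["research"] (by intro n; simp [pvKw]),
      pv_cond_eq phase_names "ACQUIRE" ["acquire"] (by intro n; simp [pvKw])]
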